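-- pv_equiv track=rewrite | github.com/simoRancati/Comp_Emb | ParamTuning/Embedding/Wasserstein Distance/Autoencoder/AE_0_99/123Trimester/Utils.py | transform_labels
-- ===== SOURCE A (Python) =====
-- def transform_labels(labels, parent_classes):
--     transformed_labels = []
--     for label in labels:
--         # Gestione dei casi 'unknown' e simili
--         if label in parent_classes or 'unknown' in label:
--             transformed_labels.append(label)
--             continue
--
--         # Ricerca del padre più specifico per l'etichetta corrente
--         parent_found = None
--         for parent in parent_classes:
--             if label.startswith(parent):
--                 # Seleziona il padre più lungo che corrisponde (più specifico)
--                 if parent_found is None or len(parent) > len(parent_found):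
--                     parent_found = parent
--
--         # Aggiunta del padre trovato o dell'etichetta originale se non è stato trovato alcun padre
--         transformed_labels.append(parent_found if parent_found else label)
--
--     return transformed_labels
-- ===== SOURCE B (Python) =====
-- def transform_labels(labels, parent_classes):
--     # Different algorithm: membership set + longest-prefix search over the label's
--     # own prefixes (longest first), instead of scanning all parent_classes per label.
--     parents = set(parent_classes)
--     transformed_labels = []
--     for label in labels:
--         if 'unknown' in label:
--             transformed_labels.append(label)
--             continue
--         result = label
--         for k in range(len(label), 0, -1):
--             prefix = label[:k]
--             if prefix in parents:
--                 result = prefix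
--                 break
--         transformed_labels.append(result)
--     return transformed_labels
-- ===== Notes on version B (the rewrite author's own statement) =====
-- stated objective: faster
-- what changed: Instead of scanning every parent class for each label while tracking the longest matching prefix, B builds a set of parent classes once and for each label checks its own prefixes from longest to shortest, returning the first one in the set.
import Mathlib
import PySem

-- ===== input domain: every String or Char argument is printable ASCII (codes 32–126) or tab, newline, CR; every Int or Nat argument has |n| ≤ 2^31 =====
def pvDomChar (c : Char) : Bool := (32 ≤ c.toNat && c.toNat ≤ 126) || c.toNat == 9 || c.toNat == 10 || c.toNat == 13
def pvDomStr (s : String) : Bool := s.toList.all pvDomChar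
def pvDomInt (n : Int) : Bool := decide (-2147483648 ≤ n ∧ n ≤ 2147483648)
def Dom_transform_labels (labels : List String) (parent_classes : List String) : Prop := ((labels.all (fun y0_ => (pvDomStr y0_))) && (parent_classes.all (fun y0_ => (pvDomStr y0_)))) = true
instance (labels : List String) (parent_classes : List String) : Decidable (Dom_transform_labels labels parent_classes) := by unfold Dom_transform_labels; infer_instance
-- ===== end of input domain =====

-- B builds the parent set once and searches each label's own prefixes longest-first,
-- instead of A's scan over all parent classes per label (objective: faster).


-- ===== PORT A =====
-- A's inner loop: 'for parent in parent_classes: if label.startswith(parent): if parent_found is None or len(parent) > len(parent_found): parent_found = parent'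
def pvStepA (label : String) (pf : Option String) (parent : String) : Option String :=
  if PySem.Str.startswith label parent then
    match pf with
    | none => some parent
    | some f => if PySem.Str.len parent > PySem.Str.len f then some parent else some f
  else pf

def transform_labels (labels : List String) (parent_classes : List String) : List String :=
  labels.foldl (fun acc label =>
    if parent_classes.contains label || PySem.Str.isIn "unknown" label then
      acc ++ [label]
    else
      -- 'parent_found if parent_found else label': None and '' are both falsy in Python
      acc ++ [match parent_classes.foldl (pvStepA label) none with
              | some p => if p = "" then label else p
              | none => label]) []

-- ===== PORT B =====
-- B's inner loop: 'for k in range(len(label), 0, -1): if label[:k] in parents: result = label[:k]; break'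
def pvScanB (parents : PySem.Set String) (label : String) : Nat → String
  | 0 => label
  | k + 1 =>
    let prefix_ := PySem.Str.slice label none (some ((k : Int) + 1))
    if PySem.Set.contains parents prefix_ then prefix_ else pvScanB parents label k

def transform_labels_alt (labels : List String) (parent_classes : List String) : List String :=
  let parents : PySem.Set String := PySem.Set.ofList parent_classes
  labels.foldl (fun acc label =>
    if PySem.Str.isIn "unknown" label then
      acc ++ [label]
    else
      acc ++ [pvScanB parents label (PySem.Str.len label).toNat]) []

-- ===== PRECONDITION & SPEC =====
def Spec_transform_labels (labels : List String) (parent_classes : List String) (out : List String) : Prop := out = transform_labels_alt labels parent_classes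
instance (labels : List String) (parent_classes : List String) (out : List String) : Decidable (Spec_transform_labels labels parent_classes out) := by unfold Spec_transform_labels; infer_instance

-- ===== CLAIM (what is proved, stated in full; the proofs are below) =====
def Claim_equal_transform_labels : Prop := ∀ (labels : List String) (parent_classes : List String), Dom_transform_labels labels parent_classes → Spec_transform_labels labels parent_classes (transform_labels labels parent_classes)

-- ===== LEMMAS AND PROOFS =====

theorem stepA_not {label p : String} {pf : Option String}
    (hs : PySem.Str.startswith label p = false) : pvStepA label pf p = pf := by
  simp only [pvStepA, hs]; simp

theorem stepA_none {label p : String} (hs : PySem.Str.startswith label p = true) :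
    pvStepA label none p = some p := by
  simp only [pvStepA, hs]; simp

theorem stepA_some {label p f : String} (hs : PySem.Str.startswith label p = true) :
    pvStepA label (some f) p
      = if PySem.Str.len p > PySem.Str.len f then some p else some f := by
  simp only [pvStepA, hs]; simp

theorem startswith_prefix {label p : String} :
    PySem.Str.startswith label p = true ↔ p.toList <+: label.toList := by
  simp [pysem, PySem.Chars.startswith_iff]

theorem pvA_mono (label : String) (ps : List String) :
    ∀ (a q : String), ps.foldl (pvStepA label) (some a) = some q →
      a.toList.length ≤ q.toList.length := by
  induction ps with
  | nil => intro a q h; simp at h; subst h; exact le_refl _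
  | cons p t ih =>
    intro a q h
    rw [List.foldl_cons] at h
    cases hs : PySem.Str.startswith label p with
    | false => rw [stepA_not hs] at h; exact ih a q h
    | true =>
      rw [stepA_some hs] at h
      split at h
      · have h1 := ih p q h
        have h2 : a.toList.length < p.toList.length := by
          have := ‹PySem.Str.len p > PySem.Str.len a›; simpa [pysem] using this
        omega
      · exact ih a q h

theorem pvA_isSome (label : String) (ps : List String) :
    ∀ (a : String), ∃ q, ps.foldl (pvStepA label) (some a) = some q := by
  induction ps with
  | nil => intro a; exact ⟨a, rfl⟩
  | cons p t ih =>
    intro a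
    rw [List.foldl_cons]
    cases hs : PySem.Str.startswith label p with
    | false => rw [stepA_not hs]; exact ih a
    | true =>
      rw [stepA_some hs]; split
      · exact ih p
      · exact ih a

theorem pvA_prefix (label : String) (ps : List String) :
    ∀ (pf : Option String), (∀ a, pf = some a → a.toList <+: label.toList) →
      ∀ q, ps.foldl (pvStepA label) pf = some q → q.toList <+: label.toList := by
  induction ps with
  | nil => intro pf h q hq; simp at hq; exact h q hq
  | cons p t ih =>
    intro pf h q hq
    rw [List.foldl_cons] at hq
    cases hs : PySem.Str.startswith label p with
    | false => rw [stepA_not hs] at hq; exact ih pf h q hq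
    | true =>
      have hp : p.toList <+: label.toList := startswith_prefix.mp hs
      cases hpf : pf with
      | none =>
        rw [hpf, stepA_none hs] at hq
        refine ih (some p) ?_ q hq
        intro a ha; cases ha; exact hp
      | some f =>
        rw [hpf, stepA_some hs] at hq
        split at hq
        · refine ih (some p) ?_ q hq; intro a ha; cases ha; exact hp
        · refine ih (some f) ?_ q hq; intro a ha; cases ha; exact h f hpf

theorem pvA_mem (label : String) (ps : List String) :
    ∀ (pf : Option String), ∀ q, ps.foldl (pvStepA label) pf = some q →
      q ∈ ps ∨ pf = some q := by
  induction ps with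
  | nil => intro pf q h; simp at h; right; exact h
  | cons p t ih =>
    intro pf q h
    rw [List.foldl_cons] at h
    cases hs : PySem.Str.startswith label p with
    | false =>
      rw [stepA_not hs] at h
      rcases ih pf q h with hm | he
      · left; exact List.mem_cons_of_mem _ hm
      · right; exact he
    | true =>
      cases hpf : pf with
      | none =>
        rw [hpf, stepA_none hs] at h
        rcases ih (some p) q h with hm | he
        · left; exact List.mem_cons_of_mem _ hm
        · left; cases he; exact List.mem_cons_self ..
      | some f =>
        rw [hpf, stepA_some hs] at h
        split at h
        · rcases ih (some p) q h with hm | he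
          · left; exact List.mem_cons_of_mem _ hm
          · left; cases he; exact List.mem_cons_self ..
        · rcases ih (some f) q h with hm | he
          · left; exact List.mem_cons_of_mem _ hm
          · right; exact he

theorem pvA_max (label : String) (ps : List String) :
    ∀ (pf : Option String), ∀ q, ps.foldl (pvStepA label) pf = some q →
      ∀ p ∈ ps, p.toList <+: label.toList → p.toList.length ≤ q.toList.length := by
  induction ps with
  | nil => intro pf q _ p hp; simp at hp
  | cons p0 t ih =>
    intro pf q h p hp hpre
    rw [List.foldl_cons] at h
    rcases List.mem_cons.mp hp with rfl | hmem
    · have hs : PySem.Str.startswith label p = true := startswith_prefix.mpr hpre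
      cases hpf : pf with
      | none =>
        rw [hpf, stepA_none hs] at h
        exact pvA_mono label t p q h
      | some f =>
        rw [hpf, stepA_some hs] at h
        split at h
        · exact pvA_mono label t p q h
        · have hle : p.toList.length ≤ f.toList.length := by
            have := ‹¬ PySem.Str.len p > PySem.Str.len f›
            simp [pysem] at this; exact this
          have := pvA_mono label t f q h
          omega
    · cases hs : PySem.Str.startswith label p0 with
      | false => rw [stepA_not hs] at h; exact ih pf q h p hmem hpre
      | true =>
        cases hpf : pf with
        | none => rw [hpf, stepA_none hs] at h; exact ih (some p0) q h p hmem hpre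
        | some f =>
          rw [hpf, stepA_some hs] at h
          split at h
          · exact ih (some p0) q h p hmem hpre
          · exact ih (some f) q h p hmem hpre

theorem pvA_none (label : String) (ps : List String) :
    ∀ (pf : Option String), ps.foldl (pvStepA label) pf = none →
      ∀ p ∈ ps, ¬ p.toList <+: label.toList := by
  induction ps with
  | nil => intro pf _ p hp; simp at hp
  | cons p0 t ih =>
    intro pf h p hp hpre
    rw [List.foldl_cons] at h
    rcases List.mem_cons.mp hp with rfl | hmem
    · have hs : PySem.Str.startswith label p = true := startswith_prefix.mpr hpre
      cases hpf : pf with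
      | none =>
        rw [hpf, stepA_none hs] at h
        obtain ⟨q, hq⟩ := pvA_isSome label t p
        rw [hq] at h; simp at h
      | some f =>
        rw [hpf, stepA_some hs] at h
        split at h
        · obtain ⟨q, hq⟩ := pvA_isSome label t p
          rw [hq] at h; simp at h
        · obtain ⟨q, hq⟩ := pvA_isSome label t f
          rw [hq] at h; simp at h
    · cases hs : PySem.Str.startswith label p0 with
      | false => rw [stepA_not hs] at h; exact ih pf h p hmem hpre
      | true =>
        cases hpf : pf with
        | none =>
          rw [hpf, stepA_none hs] at h
          obtain ⟨q, hq⟩ := pvA_isSome label t p0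
          rw [hq] at h; simp at h
        | some f =>
          rw [hpf, stepA_some hs] at h
          split at h <;>
          · obtain ⟨q, hq⟩ := pvA_isSome label t _
            rw [hq] at h; simp at h


theorem strT_toList (label : String) (j : Nat) :
    (PySem.Str.slice label none (some (j : Int))).toList = label.toList.take j := by
  simp [pysem]

theorem scanB_step (parents : PySem.Set String) (label : String) (k : Nat) :
    pvScanB parents label (k + 1)
      = if PySem.Set.contains parents (PySem.Str.slice label none (some ((k + 1 : Nat) : Int)))
        then PySem.Str.slice label none (some ((k + 1 : Nat) : Int))
        else pvScanB parents label k := by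
  have : ((k : Int) + 1) = ((k + 1 : Nat) : Int) := by push_cast; ring
  simp only [pvScanB, this]

theorem str_ext {s t : String} (h : s.toList = t.toList) : s = t :=
  String.toList_inj.mp h

theorem mem_ofList_contains {ps : List String} {x : String} :
    PySem.Set.contains (PySem.Set.ofList ps) x = true ↔ x ∈ ps := by
  simp [pysem]

theorem scanB_none (label : String) (ps : List String) (k : Nat)
    (h : ∀ j, 1 ≤ j → j ≤ k → PySem.Str.slice label none (some (j : Int)) ∉ ps) :
    pvScanB (PySem.Set.ofList ps) label k = label := by
  induction k with
  | zero => rfl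
  | succ k ih =>
    rw [scanB_step]
    have hc : PySem.Set.contains (PySem.Set.ofList ps)
        (PySem.Str.slice label none (some ((k + 1 : Nat) : Int))) = false := by
      rw [Bool.eq_false_iff]
      intro hx
      exact h (k+1) (by omega) (le_refl _) (mem_ofList_contains.mp hx)
    rw [hc]
    simp only [Bool.false_eq_true, if_false]
    exact ih (fun j h1 h2 => h j h1 (by omega))

theorem scanB_hit (label : String) (ps : List String) (m : Nat)
    (hm : 1 ≤ m)
    (hin : PySem.Str.slice label none (some (m : Int)) ∈ ps)
    : ∀ k, m ≤ k →
      (∀ j, m < j → j ≤ k → PySem.Str.slice label none (some (j : Int)) ∉ ps) →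
      pvScanB (PySem.Set.ofList ps) label k = PySem.Str.slice label none (some (m : Int)) := by
  intro k
  induction k with
  | zero => intro h _; omega
  | succ k ih =>
    intro hk hno
    rw [scanB_step]
    by_cases he : m = k + 1
    · subst he
      have hc : PySem.Set.contains (PySem.Set.ofList ps)
          (PySem.Str.slice label none (some ((k + 1 : Nat) : Int))) = true :=
        mem_ofList_contains.mpr hin
      rw [hc]; simp
    · have hc : PySem.Set.contains (PySem.Set.ofList ps)
          (PySem.Str.slice label none (some ((k + 1 : Nat) : Int))) = false := by
        rw [Bool.eq_false_iff]
        intro hx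
        exact hno (k+1) (by omega) (le_refl _) (mem_ofList_contains.mp hx)
      rw [hc]
      simp only [Bool.false_eq_true, if_false]
      exact ih (by omega) (fun j h1 h2 => hno j h1 (by omega))

theorem take_mem_prefix {label : String} {l : List Char} (j : Nat)
    (h : (PySem.Str.slice label none (some (j : Int))).toList = l) :
    l <+: label.toList := by
  rw [← h, strT_toList]; exact List.take_prefix j label.toList

theorem perLabel (label : String) (ps : List String) :
    (if ps.contains label || PySem.Str.isIn "unknown" label then label
     else match ps.foldl (pvStepA label) none with
          | some p => if p = "" then label else p
          | none => label)
    = (if PySem.Str.isIn "unknown" label then label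
       else pvScanB (PySem.Set.ofList ps) label (PySem.Str.len label).toNat) := by
  have hlen : (PySem.Str.len label).toNat = label.toList.length := by simp [pysem]
  by_cases hu : PySem.Str.isIn "unknown" label = true
  · simp only [hu, Bool.or_true, if_true]
  · rw [Bool.not_eq_true] at hu
    simp only [hu, Bool.or_false, Bool.false_eq_true, if_false, hlen]
    by_cases hc : ps.contains label = true
    · -- label is itself a parent class: both sides give label
      simp only [hc, if_true]
      have hmem : label ∈ ps := List.mem_of_elem_eq_true hc
      cases hn : label.toList.length with
      | zero => rfl
      | succ k =>
        rw [scanB_step]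
        have hfull : PySem.Str.slice label none (some ((k + 1 : Nat) : Int)) = label :=
          str_ext (by rw [strT_toList, ← hn, List.take_length])
        rw [hfull, mem_ofList_contains.mpr hmem]
        simp
    · simp only [hc, Bool.false_eq_true, if_false]
      cases hr : ps.foldl (pvStepA label) none with
      | none =>
        have hnone := pvA_none label ps none hr
        rw [scanB_none label ps _ ?_]
        intro j _ _ hin
        exact hnone _ hin (take_mem_prefix j rfl)
      | some q =>
        have hqpre : q.toList <+: label.toList :=
          pvA_prefix label ps none (by intro a ha; cases ha) q hr
        have hqmem : q ∈ ps := (pvA_mem label ps none q hr).resolve_right (by simp)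
        have hqmax := pvA_max label ps none q hr
        by_cases hq0 : q = ""
        · -- only the empty string matches: Python falsiness makes A keep the label
          simp only [hq0, if_true]
          rw [scanB_none label ps _ ?_]
          intro j h1 h2 hin
          have hpre : (PySem.Str.slice label none (some (j : Int))).toList <+: label.toList :=
            take_mem_prefix j rfl
          have hj := hqmax _ hin hpre
          rw [strT_toList] at hj
          rw [List.length_take_of_le h2] at hj
          rw [hq0] at hj
          simp at hj
          omega
        · simp only [hq0, if_false]
          have hm1 : 1 ≤ q.toList.length := by
            rcases Nat.eq_zero_or_pos q.toList.length with h0 | h0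
            · exact absurd (str_ext (by simp [List.eq_nil_of_length_eq_zero h0])) hq0
            · exact h0
          have hqtake : PySem.Str.slice label none (some ((q.toList.length : Nat) : Int)) = q :=
            str_ext (by rw [strT_toList]; exact (List.prefix_iff_eq_take.mp hqpre).symm)
          have hin : PySem.Str.slice label none (some ((q.toList.length : Nat) : Int)) ∈ ps := by
            rw [hqtake]; exact hqmem
          have hno : ∀ j, q.toList.length < j → j ≤ label.toList.length →
              PySem.Str.slice label none (some (j : Int)) ∉ ps := by
            intro j h1 h2 hjin
            have hj := hqmax _ hjin (take_mem_prefix j rfl)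
            rw [strT_toList, List.length_take_of_le h2] at hj
            omega
          rw [scanB_hit label ps q.toList.length hm1 hin label.toList.length
              hqpre.length_le hno, hqtake]

-- the per-label functions the two folds compute
def pvFA (ps : List String) (label : String) : String :=
  if ps.contains label || PySem.Str.isIn "unknown" label then label
  else match ps.foldl (pvStepA label) none with
       | some p => if p = "" then label else p
       | none => label

def pvFB (ps : List String) (label : String) : String :=
  if PySem.Str.isIn "unknown" label then label
  else pvScanB (PySem.Set.ofList ps) label (PySem.Str.len label).toNat

theorem foldl_append_fn {α β : Type} (F : α → β) (xs : List α) :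
    xs.foldl (fun acc x => acc ++ [F x]) [] = xs.map F := by
  induction xs using List.reverseRecOn with
  | nil => rfl
  | append_singleton t x ih => simp [ih]

theorem transform_labels_eq_map (labels ps : List String) :
    transform_labels labels ps = labels.map (pvFA ps) := by
  unfold transform_labels
  have hf : (fun (acc : List String) (label : String) =>
      if ps.contains label || PySem.Str.isIn "unknown" label then
        acc ++ [label]
      else
        acc ++ [match ps.foldl (pvStepA label) none with
                | some p => if p = "" then label else p
                | none => label])
      = (fun acc label => acc ++ [pvFA ps label]) := by
    funext acc label
    unfold pvFA
    split <;> rfl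
  rw [hf, foldl_append_fn]

theorem transform_labels_alt_eq_map (labels ps : List String) :
    transform_labels_alt labels ps = labels.map (pvFB ps) := by
  have h0 : transform_labels_alt labels ps
      = labels.foldl (fun acc label =>
          if PySem.Str.isIn "unknown" label then
            acc ++ [label]
          else
            acc ++ [pvScanB (PySem.Set.ofList ps) label (PySem.Str.len label).toNat]) [] := rfl
  rw [h0]
  have hf : (fun (acc : List String) (label : String) =>
      if PySem.Str.isIn "unknown" label then
        acc ++ [label]
      else
        acc ++ [pvScanB (PySem.Set.ofList ps) label (PySem.Str.len label).toNat])
      = (fun acc label => acc ++ [pvFB ps label]) := by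
    funext acc label
    unfold pvFB
    split <;> rfl
  rw [hf, foldl_append_fn]

theorem pvFA_eq_pvFB (ps : List String) (label : String) :
    pvFA ps label = pvFB ps label := by
  unfold pvFA pvFB
  exact perLabel label ps

-- ===== VERDICT (by name: the statement is the Claim_ definition above) =====
theorem transform_labels_spec : Claim_equal_transform_labels := by
  intro labels parent_classes _
  unfold Spec_transform_labels
  rw [transform_labels_eq_map, transform_labels_alt_eq_map]
  exact List.map_congr_left (fun x _ => pvFA_eq_pvFB parent_classes x)
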